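-- pv_equiv track=rewrite | github.com/mdshafiulazama/2023 | 2023/sequence.py | count_non_beautiful_subarrays
-- ===== SOURCE A (Python) =====
-- def count_non_beautiful_subarrays(arr):
--     result = 0
--     i = 0
--     while i < len(arr):
--         count = 1
--         while i + 1 < len(arr) and arr[i] == arr[i + 1]:
--             count += 1
--             i += 1
--         result += (count * (count + 1)) // 2
--         i += 1
--     return result
-- ===== SOURCE B (Python) =====
-- def count_non_beautiful_subarrays(arr):
--     result = 0
--     run = 0
--     prev = None
--     for x in arr:
--         run = run + 1 if prev == x else 1
--         result += run
--         prev = x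
--     return result
-- ===== Notes on version B (the rewrite author's own statement) =====
-- stated objective: simpler
-- what changed: Replaced the nested while loop that detects whole runs and adds the closed form c*(c+1)//2 per run by a single flat for-loop that maintains the current run length and adds it on every element.
import Mathlib
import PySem

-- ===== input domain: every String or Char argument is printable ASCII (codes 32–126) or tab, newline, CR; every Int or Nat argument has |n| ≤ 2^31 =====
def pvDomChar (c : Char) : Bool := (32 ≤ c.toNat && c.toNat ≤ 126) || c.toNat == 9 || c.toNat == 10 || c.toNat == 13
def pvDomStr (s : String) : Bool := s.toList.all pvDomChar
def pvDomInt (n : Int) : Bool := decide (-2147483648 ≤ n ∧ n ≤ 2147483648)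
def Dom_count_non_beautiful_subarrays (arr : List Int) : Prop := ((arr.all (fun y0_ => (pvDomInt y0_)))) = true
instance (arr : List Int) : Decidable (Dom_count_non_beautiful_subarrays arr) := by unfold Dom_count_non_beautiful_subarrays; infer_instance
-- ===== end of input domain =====

-- B replaces the nested run-detecting while loop (+ closed form per run) by one flat loop
-- accumulating the current run length per element; objective: simpler.


-- ===== PORT A =====
-- inner while loop: while i + 1 < len(arr) and arr[i] == arr[i+1]: count += 1; i += 1
-- (fuel makes the recursion structural; arr.length fuel always suffices, see pvAInner_spec)
def pvAInner (arr : List Int) (fuel : Nat) (i : Nat) (count : Int) : Nat × Int :=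
  match fuel with
  | 0 => (i, count)
  | fuel + 1 =>
    if i + 1 < arr.length ∧ arr.getD i 0 = arr.getD (i + 1) 0 then
      pvAInner arr fuel (i + 1) (count + 1)
    else (i, count)

-- outer while loop over i (i advances by at least 1 per iteration, so arr.length + 1 fuel suffices)
def pvAOuter (arr : List Int) (fuel : Nat) (i : Nat) (result : Int) : Int :=
  match fuel with
  | 0 => result
  | fuel + 1 =>
    if i < arr.length then
      let p := pvAInner arr arr.length i 1
      pvAOuter arr fuel (p.1 + 1) (result + PySem.Int.floordiv (p.2 * (p.2 + 1)) 2)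
    else result

def count_non_beautiful_subarrays (arr : List Int) : Int := pvAOuter arr (arr.length + 1) 0 0

-- ===== PORT B =====
-- one iteration of B's for-loop; state = (result, run, prev)
def pvBStep (s : Int × Int × Option Int) (x : Int) : Int × Int × Option Int :=
  let run := if s.2.2 = some x then s.2.1 + 1 else 1
  (s.1 + run, run, some x)

def count_non_beautiful_subarrays_alt (arr : List Int) : Int :=
  (arr.foldl pvBStep (0, 0, none)).1

-- ===== PRECONDITION & SPEC =====
def Spec_count_non_beautiful_subarrays (arr : List Int) (out : Int) : Prop := out = count_non_beautiful_subarrays_alt arr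
instance (arr : List Int) (out : Int) : Decidable (Spec_count_non_beautiful_subarrays arr out) := by unfold Spec_count_non_beautiful_subarrays; infer_instance

-- ===== CLAIM (what is proved, stated in full; the proofs are below) =====
def Claim_equal_count_non_beautiful_subarrays : Prop := ∀ (arr : List Int), Dom_count_non_beautiful_subarrays arr → Spec_count_non_beautiful_subarrays arr (count_non_beautiful_subarrays arr)

-- ===== LEMMAS AND PROOFS =====

-- length of the leading run of x's
def pvLead (x : Int) : List Int → Nat
  | [] => 0
  | y :: ys => if y = x then 1 + pvLead x ys else 0

-- common reference value: sum over runs of c*(c+1)//2 (fuel-structural)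
def pvGF : Nat → List Int → Int
  | 0, _ => 0
  | _ + 1, [] => 0
  | n + 1, x :: xs =>
      PySem.Int.floordiv ((1 + (pvLead x xs : Int)) * ((1 + (pvLead x xs : Int)) + 1)) 2
        + pvGF n (xs.drop (pvLead x xs))

theorem pvGF_nil (n : Nat) : pvGF n [] = 0 := by cases n <;> rfl

theorem pvLead_le (x : Int) (l : List Int) : pvLead x l ≤ l.length := by
  induction l with
  | nil => simp [pvLead]
  | cons y ys ih =>
    simp only [pvLead, List.length_cons]
    split
    · omega
    · omega

theorem pvGF_congr : ∀ (m : Nat) (n : Nat) (l : List Int), l.length ≤ m → l.length ≤ n →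
    pvGF m l = pvGF n l := by
  intro m
  induction m with
  | zero =>
    intro n l hm _
    have : l = [] := List.eq_nil_of_length_eq_zero (by omega)
    subst this
    rw [pvGF_nil, pvGF_nil]
  | succ m ih =>
    intro n l hm hn
    cases l with
    | nil => rw [pvGF_nil, pvGF_nil]
    | cons x xs =>
      obtain ⟨n', rfl⟩ : ∃ n', n = n' + 1 := by
        cases n with
        | zero => exfalso; simp at hn
        | succ k => exact ⟨k, rfl⟩
      simp only [pvGF]
      have hk := pvLead_le x xs
      have h1 : (xs.drop (pvLead x xs)).length ≤ m := by
        simp only [List.length_drop]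
        simp at hm; omega
      have h2 : (xs.drop (pvLead x xs)).length ≤ n' := by
        simp only [List.length_drop]
        simp at hn; omega
      rw [ih n' _ h1 h2]

theorem pvLead_drop (x : Int) (l : List Int) :
    ∀ y ys, l.drop (pvLead x l) = y :: ys → y ≠ x := by
  induction l with
  | nil => intro y ys h; simp at h
  | cons z zs ih =>
    intro y ys h
    by_cases hz : z = x
    · rw [pvLead, if_pos hz, Nat.add_comm, List.drop_succ_cons] at h
      exact ih y ys h
    · rw [pvLead, if_neg hz, List.drop_zero] at h
      injection h with h1 _
      rw [← h1]; exact hz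

theorem pvAInner_spec (arr : List Int) : ∀ (xs : List Int) (fuel i : Nat) (c : Int) (x : Int),
    xs.length ≤ fuel → i < arr.length → arr.drop i = x :: xs →
    pvAInner arr fuel i c = (i + pvLead x xs, c + pvLead x xs) := by
  intro xs
  induction xs with
  | nil =>
    intro fuel i c x _ hi hd
    have hlen : arr.length = i + 1 := by
      have := congrArg List.length hd
      simp at this; omega
    cases fuel with
    | zero => simp [pvAInner, pvLead]
    | succ f =>
      rw [pvAInner, if_neg (by intro hcon; omega)]
      simp [pvLead]
  | cons y ys ih =>
    intro fuel i c x hfuel hi hd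
    obtain ⟨f, rfl⟩ : ∃ f, fuel = f + 1 := by
      cases fuel with
      | zero => exfalso; simp at hfuel
      | succ k => exact ⟨k, rfl⟩
    have hlen : arr.length - i = ys.length + 2 := by
      have := congrArg List.length hd
      simp at this; omega
    have hi1 : i + 1 < arr.length := by omega
    have hxi : arr.getD i 0 = x := by
      have h0 : arr[i]? = some x := by
        have h2 : (arr.drop i)[0]? = some x := by rw [hd]; rfl
        rwa [List.getElem?_drop, Nat.add_zero] at h2
      simp [List.getD_eq_getElem?_getD, h0]
    have hd1 : arr.drop (i + 1) = y :: ys := by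
      have h2 : (arr.drop i).drop 1 = arr.drop (i + 1) := List.drop_drop
      rw [← h2, hd]; simp
    have hyi : arr.getD (i + 1) 0 = y := by
      have h0 : arr[i + 1]? = some y := by
        have h2 : (arr.drop (i + 1))[0]? = some y := by rw [hd1]; rfl
        rwa [List.getElem?_drop, Nat.add_zero] at h2
      simp [List.getD_eq_getElem?_getD, h0]
    by_cases hxy : y = x
    · have hcond : arr.getD i 0 = arr.getD (i + 1) 0 := by rw [hxi, hyi, hxy]
      rw [pvAInner, if_pos ⟨hi1, hcond⟩,
          ih f (i + 1) (c + 1) y (by simp at hfuel; omega) hi1 hd1]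
      have hl : pvLead x (y :: ys) = 1 + pvLead y ys := by
        simp only [pvLead, if_pos hxy]
        rw [hxy]
      rw [hl]
      simp only [Prod.mk.injEq]
      constructor
      · omega
      · push_cast; ring
    · rw [pvAInner, if_neg (by
        intro hcon
        rw [hxi, hyi] at hcon
        exact hxy hcon.2.symm)]
      simp only [pvLead, if_neg hxy]
      simp

-- Nat triangle-number step used on both sides
theorem pvTri (k : Nat) : (k + 1) * (k + 2) / 2 = k * (k + 1) / 2 + (k + 1) := by
  have h : (k + 1) * (k + 2) = k * (k + 1) + (k + 1) * 2 := by ring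
  rw [h, Nat.add_mul_div_right _ _ (by omega : 0 < 2)]

theorem pvFloordiv_tri (k : Nat) :
    PySem.Int.floordiv ((1 + (k : Int)) * ((1 + (k : Int)) + 1)) 2
      = 1 + (k : Int) + ((k * (k + 1) / 2 : Nat) : Int) := by
  have h1 : (1 + (k : Int)) * ((1 + (k : Int)) + 1) = (((k + 1) * (k + 2) : Nat) : Int) := by
    push_cast; ring
  have h2 : PySem.Int.floordiv ((((k + 1) * (k + 2) : Nat)) : Int) 2
      = (((k + 1) * (k + 2) / 2 : Nat) : Int) := by
    exact_mod_cast PySem.Int.floordiv_natCast ((k + 1) * (k + 2)) 2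
  rw [h1, h2, pvTri k]
  push_cast; ring

theorem pvAOuter_g (arr : List Int) : ∀ (fuel i : Nat) (r : Int),
    arr.length - i < fuel → pvAOuter arr fuel i r = r + pvGF (arr.length - i) (arr.drop i) := by
  intro fuel
  induction fuel with
  | zero => intro i r hf; omega
  | succ f ih =>
    intro i r hf
    by_cases hi : i < arr.length
    · obtain ⟨x, xs, hd⟩ : ∃ x xs, arr.drop i = x :: xs := by
        cases hxs : arr.drop i with
        | nil => exfalso; have := congrArg List.length hxs; simp at this; omega
        | cons a b => exact ⟨a, b, rfl⟩
      have hlen : arr.length - i = xs.length + 1 := by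
        have := congrArg List.length hd; simp at this; omega
      rw [pvAOuter, if_pos hi,
          pvAInner_spec arr xs arr.length i 1 x (by omega) hi hd]
      simp only
      set k := pvLead x xs with hk
      have hklen : k ≤ xs.length := pvLead_le x xs
      rw [ih (i + k + 1) _ (by omega)]
      have hdrop : arr.drop (i + k + 1) = xs.drop k := by
        have h1 : arr.drop (i + 1) = xs := by
          have h2 : (arr.drop i).drop 1 = arr.drop (i + 1) := List.drop_drop
          rw [← h2, hd]; simp
        have h3 : (arr.drop (i + 1)).drop k = arr.drop (i + 1 + k) := List.drop_drop
        rw [← show i + 1 + k = i + k + 1 by omega, ← h3, h1]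
      rw [hdrop]
      conv_rhs => rw [show arr.drop i = x :: xs from hd, hlen]
      simp only [pvGF, ← hk]
      have hcg : pvGF (arr.length - (i + k + 1)) (xs.drop k) = pvGF xs.length (xs.drop k) := by
        apply pvGF_congr <;> simp only [List.length_drop] <;> omega
      rw [hcg]
      ring
    · rw [pvAOuter, if_neg hi, List.drop_of_length_le (by omega), pvGF_nil]
      ring

theorem pvBStep_run (x : Int) : ∀ (xs : List Int) (r run : Int),
    List.foldl pvBStep (r, run, some x) xs
      = List.foldl pvBStep
          (r + (pvLead x xs : Int) * run + ((pvLead x xs * (pvLead x xs + 1) / 2 : Nat) : Int),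
           run + (pvLead x xs : Int), some x)
          (xs.drop (pvLead x xs)) := by
  intro xs
  induction xs with
  | nil =>
    intro r run
    simp only [pvLead, List.foldl_nil, List.drop_nil]
    norm_num
  | cons y ys ih =>
    intro r run
    by_cases hxy : y = x
    · simp only [pvLead, if_pos hxy]
      have hstep : pvBStep (r, run, some x) y = (r + (run + 1), run + 1, some x) := by
        simp [pvBStep, hxy]
      rw [List.foldl_cons, hstep, ih (r + (run + 1)) (run + 1)]
      set k := pvLead x ys with hk
      have hdrop : (y :: ys).drop (1 + k) = ys.drop k := by
        rw [Nat.add_comm, List.drop_succ_cons]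
      rw [hdrop]
      have h1 : r + (run + 1) + (k : Int) * (run + 1) + ((k * (k + 1) / 2 : Nat) : Int)
          = r + ((1 + k : Nat) : Int) * run + (((1 + k) * (1 + k + 1) / 2 : Nat) : Int) := by
        have h2 : ((1 + k) * (1 + k + 1) / 2 : Nat) = k * (k + 1) / 2 + (k + 1) := by
          rw [show (1 + k) * (1 + k + 1) = (k + 1) * (k + 2) by ring]
          exact pvTri k
        rw [h2]; push_cast; ring
      have h3 : run + 1 + (k : Int) = run + ((1 + k : Nat) : Int) := by push_cast; ring
      rw [h1, h3]
    · simp only [pvLead, if_neg hxy]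
      norm_num

theorem pvBfold_g : ∀ (n : Nat) (l : List Int) (r run : Int) (prev : Option Int),
    l.length ≤ n → (∀ x xs, l = x :: xs → prev ≠ some x) →
    (List.foldl pvBStep (r, run, prev) l).1 = r + pvGF l.length l := by
  intro n
  induction n with
  | zero =>
    intro l r run prev hn _
    have : l = [] := List.eq_nil_of_length_eq_zero (by omega)
    subst this
    simp [pvGF_nil]
  | succ m ih =>
    intro l r run prev hn hprev
    cases l with
    | nil => simp [pvGF_nil]
    | cons x xs =>
      have hstep : pvBStep (r, run, prev) x = (r + 1, 1, some x) := by
        simp [pvBStep, if_neg (hprev x xs rfl)]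
      rw [List.foldl_cons, hstep, pvBStep_run x xs (r + 1) 1]
      set k := pvLead x xs with hk
      have hklen : k ≤ xs.length := pvLead_le x xs
      have hxslen : xs.length ≤ m := by
        have := hn; simp at this; omega
      rw [ih (xs.drop k) _ _ _ (by simp only [List.length_drop]; omega)
          (by
            intro y ys hy hc
            injection hc with hc1
            exact pvLead_drop x xs y ys hy hc1.symm)]
      simp only [List.length_cons, pvGF, ← hk]
      have hcg : pvGF (xs.drop k).length (xs.drop k) = pvGF xs.length (xs.drop k) := by
        apply pvGF_congr <;> simp only [List.length_drop] <;> omega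
      rw [hcg, pvFloordiv_tri k]
      push_cast; ring

-- ===== VERDICT (by name: the statement is the Claim_ definition above) =====
theorem count_non_beautiful_subarrays_spec : Claim_equal_count_non_beautiful_subarrays := by
  intro arr _
  unfold Spec_count_non_beautiful_subarrays
  unfold count_non_beautiful_subarrays count_non_beautiful_subarrays_alt
  rw [pvAOuter_g arr (arr.length + 1) 0 0 (by omega)]
  rw [pvBfold_g arr.length arr 0 0 none (le_refl _) (by intro x xs _ h; simp at h)]
  simp
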